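-- pv_equiv track=rewrite | github.com/ktomczuk/pythonbootcamp | z2/kolekcje/f3_pokaz.py | policz_znaki
-- ===== SOURCE A (Python) =====
-- def policz_znaki(napis):
--     poziom = 0
--     il_poziomow = 0
--     for i in napis:
--         if i == '<':
--             poziom += 1
--             continue
--         elif i == '>':
--             poziom -= 1
--             continue
--         il_poziomow += poziom
--     return il_poziomow
-- ===== SOURCE B (Python) =====
-- def policz_znaki(napis):
--     # pass 1: table of nesting depths before each character
--     depths = [0]
--     for c in napis:
--         depths.append(depths[-1] + (1 if c == '<' else -1 if c == '>' else 0))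
--     # pass 2: sum the depth at every non-bracket character
--     return sum(d for c, d in zip(napis, depths) if c != '<' and c != '>')
-- ===== Notes on version B (the rewrite author's own statement) =====
-- stated objective: alternative
-- what changed: B splits A's fused counter loop into two stages: first build a prefix-depth table over the string, then a separate filtered summation over zip(napis, depths) of the tabulated depth at non-bracket characters.
import Mathlib
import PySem

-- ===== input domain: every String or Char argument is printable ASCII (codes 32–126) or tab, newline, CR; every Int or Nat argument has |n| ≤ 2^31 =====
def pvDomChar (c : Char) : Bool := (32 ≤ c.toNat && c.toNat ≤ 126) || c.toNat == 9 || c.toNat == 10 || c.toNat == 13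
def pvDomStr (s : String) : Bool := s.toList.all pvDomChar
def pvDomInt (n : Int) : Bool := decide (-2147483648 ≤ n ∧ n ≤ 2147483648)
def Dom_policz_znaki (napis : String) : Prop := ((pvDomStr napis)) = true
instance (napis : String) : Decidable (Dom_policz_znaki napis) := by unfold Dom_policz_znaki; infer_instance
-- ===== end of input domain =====

-- B replaces A's fused running-counter loop by two stages: build a prefix-depth table, then a filtered sum over zip (alternative decomposition, same cost).

-- ===== PORT A =====
-- one loop, state (poziom, il_poziomow)
def policz_znaki (napis : String) : Int :=
  (napis.toList.foldl
    (fun (st : Int × Int) i =>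
      if i = '<' then (st.1 + 1, st.2)
      else if i = '>' then (st.1 - 1, st.2)
      else (st.1, st.2 + st.1))
    (0, 0)).2

-- ===== PORT B =====
-- pass 1: depths table (depths[-1] read as getLast!, append of one element)
def pvDepthsB (cs : List Char) : List Int :=
  cs.foldl
    (fun ds c => ds ++ [ds.getLast! + (if c = '<' then 1 else if c = '>' then -1 else 0)])
    [0]

-- pass 2: filtered sum over zip(napis, depths)
def policz_znaki_alt (napis : String) : Int :=
  ((napis.toList.zip (pvDepthsB napis.toList)).filter
      (fun p => p.1 ≠ '<' ∧ p.1 ≠ '>')).foldl (fun a p => a + p.2) 0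

-- ===== PRECONDITION & SPEC =====
def Spec_policz_znaki (napis : String) (out : Int) : Prop := out = policz_znaki_alt napis
instance (napis : String) (out : Int) : Decidable (Spec_policz_znaki napis out) := by unfold Spec_policz_znaki; infer_instance

-- ===== CLAIM (what is proved, stated in full; the proofs are below) =====
def Claim_equal_policz_znaki : Prop := ∀ (napis : String), Dom_policz_znaki napis → Spec_policz_znaki napis (policz_znaki napis)

-- ===== LEMMAS AND PROOFS =====

-- depth-weighted count, the common characterisation
def pvG (cs : List Char) (d : Int) : Int :=
  match cs with
  | [] => 0
  | c :: cs' =>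
    if c = '<' then pvG cs' (d + 1)
    else if c = '>' then pvG cs' (d - 1)
    else d + pvG cs' d

-- suffix depth table from a starting depth
def pvDepthsFrom (d : Int) (cs : List Char) : List Int :=
  match cs with
  | [] => []
  | c :: cs' =>
    let d' := d + (if c = '<' then 1 else if c = '>' then -1 else 0)
    d' :: pvDepthsFrom d' cs'

theorem pvA_char (cs : List Char) : ∀ (p il : Int),
    (cs.foldl
      (fun (st : Int × Int) i =>
        if i = '<' then (st.1 + 1, st.2)
        else if i = '>' then (st.1 - 1, st.2)
        else (st.1, st.2 + st.1))
      (p, il)).2 = il + pvG cs p := by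
  induction cs with
  | nil => intro p il; simp [pvG]
  | cons c cs ih =>
    intro p il
    by_cases h1 : c = '<'
    · simp [List.foldl, h1, pvG, ih]
    · by_cases h2 : c = '>'
      · simp [List.foldl, h2, pvG, ih]
      · simp [List.foldl, h1, h2, pvG, ih]; ring

theorem pvDepths_eq (cs : List Char) : ∀ (ds : List Int) (d : Int), ds.getLast! = d →
    cs.foldl
      (fun ds c => ds ++ [ds.getLast! + (if c = '<' then 1 else if c = '>' then -1 else 0)])
      ds = ds ++ pvDepthsFrom d cs := by
  induction cs with
  | nil => intro ds d _; simp [pvDepthsFrom]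
  | cons c cs ih =>
    intro ds d hd
    simp only [List.foldl, pvDepthsFrom]
    rw [hd, ih (ds ++ [d + (if c = '<' then 1 else if c = '>' then -1 else 0)])
        (d + (if c = '<' then 1 else if c = '>' then -1 else 0)) (by simp)]
    simp

theorem pvB_char (cs : List Char) : ∀ (d a : Int),
    ((cs.zip (d :: pvDepthsFrom d cs)).filter (fun p => p.1 ≠ '<' ∧ p.1 ≠ '>')).foldl
      (fun a p => a + p.2) a = a + pvG cs d := by
  induction cs with
  | nil => intro d a; simp [pvG]
  | cons c cs ih =>
    intro d a
    simp only [pvDepthsFrom]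
    rw [List.zip_cons_cons, List.filter_cons]
    by_cases hc : (c ≠ '<' ∧ c ≠ '>')
    · rw [if_pos (by simpa using hc)]
      obtain ⟨h1, h2⟩ := hc
      have hδ : (if c = '<' then (1 : Int) else if c = '>' then -1 else 0) = 0 := by
        simp [h1, h2]
      rw [hδ, add_zero, List.foldl_cons, ih]
      simp [pvG, h1, h2]; ring
    · rw [if_neg (by simpa using hc), ih]
      by_cases h1 : c = '<'
      · simp [pvG, h1]
      · have h2 : c = '>' := by
          rcases not_and_or.mp hc with h | h <;> simp_all
        simp [pvG, h2]
        ring_nf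

-- ===== VERDICT (by name: the statement is the Claim_ definition above) =====
theorem policz_znaki_spec : Claim_equal_policz_znaki := by
  intro napis _
  unfold Spec_policz_znaki policz_znaki policz_znaki_alt pvDepthsB
  rw [pvA_char, pvDepths_eq napis.toList [0] 0 (by simp), List.singleton_append,
    pvB_char]
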